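-- pv_equiv track=rewrite | github.com/odnashestaia/analis_prais_list | project.py | _search_product_price_weight
-- ===== SOURCE A (Python) =====
-- def _search_product_price_weight(
--     columns, name_variants, price_variants, weight_variants
-- ):
--     """Вспомогательная функция для поиска столбцов, соответствующих имени, цене и весу"""
--     name_col = next(
--         (
--             col
--             for col in columns
--             if any(var in col.lower() for var in name_variants)
--         ),
--         None,
--     )
--     price_col = next(
--         (
--             col
--             for col in columns
--             if any(var in col.lower() for var in price_variants)
--         ),
--         None,
--     )
--     weight_col = next(
--         (
--             col
--             for col in columns
--             if any(var in col.lower() for var in weight_variants)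
--         ),
--         None,
--     )
--
--     return name_col, price_col, weight_col
-- ===== SOURCE B (Python) =====
-- def _search_product_price_weight(
--     columns, name_variants, price_variants, weight_variants
-- ):
--     """Single fused pass: three accumulators, each keeping its own first match."""
--     name_col = price_col = weight_col = None
--     for col in columns:
--         low = col.lower()
--         if name_col is None and any(var in low for var in name_variants):
--             name_col = col
--         if price_col is None and any(var in low for var in price_variants):
--             price_col = col
--         if weight_col is None and any(var in low for var in weight_variants):
--             weight_col = col
--         if name_col is not None and price_col is not None and weight_col is not None:
--             break
--     return name_col, price_col, weight_col
-- ===== Notes on version B (the rewrite author's own statement) =====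
-- stated objective: alternative
-- what changed: Replaced A's three independent generator scans over columns by one fused loop with three first-match accumulators (lower computed once per column, early break when all three are found).
import Mathlib
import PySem

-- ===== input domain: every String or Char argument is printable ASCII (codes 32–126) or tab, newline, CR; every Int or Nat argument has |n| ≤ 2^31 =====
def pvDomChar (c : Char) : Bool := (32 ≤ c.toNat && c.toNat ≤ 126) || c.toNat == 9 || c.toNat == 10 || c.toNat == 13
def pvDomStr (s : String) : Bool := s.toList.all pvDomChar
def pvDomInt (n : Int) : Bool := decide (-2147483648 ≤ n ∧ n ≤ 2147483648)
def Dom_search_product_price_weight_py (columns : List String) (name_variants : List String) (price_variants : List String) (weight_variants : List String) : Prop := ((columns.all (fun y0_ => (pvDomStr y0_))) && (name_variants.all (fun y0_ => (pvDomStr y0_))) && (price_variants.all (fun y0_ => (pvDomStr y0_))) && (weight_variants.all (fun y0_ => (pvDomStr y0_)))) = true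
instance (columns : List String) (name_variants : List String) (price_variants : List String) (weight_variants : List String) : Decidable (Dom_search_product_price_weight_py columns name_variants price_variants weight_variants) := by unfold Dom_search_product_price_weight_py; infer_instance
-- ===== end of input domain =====

-- B fuses A's three independent scans over `columns` into one pass with three
-- first-match accumulators and an early break (objective: alternative decomposition).

-- ===== PORT A =====
-- A: three independent `next((col for col in columns if any(var in col.lower() ...)), None)` scans.
def sppwMatch (variants : List String) (col : String) : Bool :=
  variants.any (fun var => PySem.Str.isIn var (PySem.Str.lower col))

def search_product_price_weight_py (columns : List String) (name_variants : List String) (price_variants : List String) (weight_variants : List String) : Option String × Option String × Option String :=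
  let name_col := columns.find? (fun col => sppwMatch name_variants col)
  let price_col := columns.find? (fun col => sppwMatch price_variants col)
  let weight_col := columns.find? (fun col => sppwMatch weight_variants col)
  (name_col, price_col, weight_col)

-- ===== PORT B =====
-- B: one fused loop, `low = col.lower()` computed once, guarded accumulator updates, early break.
def sppwGo (name_variants price_variants weight_variants : List String)
    (cols : List String) (n p w : Option String) : Option String × Option String × Option String :=
  match cols with
  | [] => (n, p, w)
  | col :: rest =>
    let low := PySem.Str.lower col
    let n' := if n.isNone && name_variants.any (fun var => PySem.Str.isIn var low) then some col else n
    let p' := if p.isNone && price_variants.any (fun var => PySem.Str.isIn var low) then some col else p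
    let w' := if w.isNone && weight_variants.any (fun var => PySem.Str.isIn var low) then some col else w
    if n'.isSome && p'.isSome && w'.isSome then (n', p', w')
    else sppwGo name_variants price_variants weight_variants rest n' p' w'

def search_product_price_weight_py_alt (columns : List String) (name_variants : List String) (price_variants : List String) (weight_variants : List String) : Option String × Option String × Option String :=
  sppwGo name_variants price_variants weight_variants columns none none none

-- ===== PRECONDITION & SPEC =====
def Spec_search_product_price_weight_py (columns : List String) (name_variants : List String) (price_variants : List String) (weight_variants : List String) (out : Option String × Option String × Option String) : Prop := out = search_product_price_weight_py_alt columns name_variants price_variants weight_variants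
instance (columns : List String) (name_variants : List String) (price_variants : List String) (weight_variants : List String) (out : Option String × Option String × Option String) : Decidable (Spec_search_product_price_weight_py columns name_variants price_variants weight_variants out) := by unfold Spec_search_product_price_weight_py; infer_instance

-- ===== CLAIM (what is proved, stated in full; the proofs are below) =====
def Claim_equal_search_product_price_weight_py : Prop := ∀ (columns : List String) (name_variants : List String) (price_variants : List String) (weight_variants : List String), Dom_search_product_price_weight_py columns name_variants price_variants weight_variants → Spec_search_product_price_weight_py columns name_variants price_variants weight_variants (search_product_price_weight_py columns name_variants price_variants weight_variants)

-- ===== LEMMAS AND PROOFS =====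

-- Pushing one column through a guarded first-match accumulator, seen through Option.or.
theorem sppwCons (vs : List String) (col : String) (rest : List String) (n : Option String) :
    n.or (List.find? (fun c => sppwMatch vs c) (col :: rest)) =
    (if n.isNone && vs.any (fun var => PySem.Str.isIn var (PySem.Str.lower col)) then some col
     else n).or (List.find? (fun c => sppwMatch vs c) rest) := by
  cases n with
  | some x => simp
  | none =>
    simp only [Option.isNone_none, Bool.true_and, List.find?_cons, sppwMatch]
    cases h : vs.any (fun var => PySem.Str.isIn var (PySem.Str.lower col)) <;> simp

-- The break-or-recurse step, with the updated accumulators abstracted.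
theorem sppwBranch (nv pv wv : List String) (rest : List String)
    (ih : ∀ n p w : Option String, sppwGo nv pv wv rest n p w =
        (n.or (rest.find? (fun col => sppwMatch nv col)),
         p.or (rest.find? (fun col => sppwMatch pv col)),
         w.or (rest.find? (fun col => sppwMatch wv col))))
    (N P W : Option String) :
    (if N.isSome && P.isSome && W.isSome then (N, P, W) else sppwGo nv pv wv rest N P W) =
      (N.or (rest.find? (fun col => sppwMatch nv col)),
       P.or (rest.find? (fun col => sppwMatch pv col)),
       W.or (rest.find? (fun col => sppwMatch wv col))) := by
  cases N <;> cases P <;> cases W <;> simp [ih]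

-- Loop invariant: B's fused loop computes, for each slot, the accumulator if already
-- set, else the first match among the remaining columns.
theorem sppwGo_eq (nv pv wv : List String) (cols : List String) :
    ∀ (n p w : Option String),
      sppwGo nv pv wv cols n p w =
        (n.or (cols.find? (fun col => sppwMatch nv col)),
         p.or (cols.find? (fun col => sppwMatch pv col)),
         w.or (cols.find? (fun col => sppwMatch wv col))) := by
  induction cols with
  | nil => intro n p w; simp [sppwGo]
  | cons col rest ih =>
    intro n p w
    rw [sppwCons nv col rest n, sppwCons pv col rest p, sppwCons wv col rest w]
    rw [sppwGo]
    exact sppwBranch nv pv wv rest ih _ _ _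

-- ===== VERDICT (by name: the statement is the Claim_ definition above) =====
theorem search_product_price_weight_py_spec : Claim_equal_search_product_price_weight_py := by
  intro columns nv pv wv _
  unfold Spec_search_product_price_weight_py search_product_price_weight_py search_product_price_weight_py_alt
  rw [sppwGo_eq]
  simp [Option.or]
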